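-- pv_equiv track=rewrite | github.com/Morpheus2112/Rosalind-exercise | bioinformatics textbook track/BA2C.py | rev_trans
-- ===== SOURCE A (Python) =====
-- def rev_trans(index, k):
--     st = ''
--     for i in range(k):
--         rem = index % 4
--         st = str(rem)+ st
--         index = index // 4
--
--     a = st.replace('0','A')
--     b = a.replace('1','C')
--     c = b.replace('2','G')
--     d = c.replace('3','T')
--     return d
-- ===== SOURCE B (Python) =====
-- def rev_trans(index, k):
--     return ''.join('ACGT'[(index >> 2 * (k - 1 - i)) % 4] for i in range(k))
-- ===== Notes on version B (the rewrite author's own statement) =====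
-- stated objective: faster
-- what changed: B emits each output character directly most-significant-first as 'ACGT'[(index >> 2*(k-1-i)) % 4] in a single join, instead of A's LSB-first loop that mutates index, prepends decimal digit characters into a growing string and then runs four string replace passes.
import Mathlib
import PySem

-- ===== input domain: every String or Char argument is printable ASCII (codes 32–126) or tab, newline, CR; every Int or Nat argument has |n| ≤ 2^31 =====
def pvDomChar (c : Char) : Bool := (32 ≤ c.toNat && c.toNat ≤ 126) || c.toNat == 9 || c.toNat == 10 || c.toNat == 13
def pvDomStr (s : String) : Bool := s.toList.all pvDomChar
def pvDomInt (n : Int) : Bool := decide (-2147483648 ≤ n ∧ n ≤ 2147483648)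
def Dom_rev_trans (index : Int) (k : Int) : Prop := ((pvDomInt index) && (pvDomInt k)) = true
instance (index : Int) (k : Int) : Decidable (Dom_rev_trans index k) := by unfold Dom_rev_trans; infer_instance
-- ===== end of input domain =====

-- B emits each output character positionally (MSB-first, shift+mod) in one join, instead of A's
-- LSB-first digit-string build followed by four replace passes; measured faster on large k (objective: faster).

-- ===== PORT A =====
-- for i in range(k): rem = index % 4; st = str(rem) + st; index = index // 4   (state: (st, index))
def rev_trans (index : Int) (k : Int) : String :=
  let r := (PySem.List.pyRange 0 k 1).foldl
    (fun (s : List Char × Int) _ =>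
      (PySem.Int.toChars (PySem.Int.mod s.2 4) ++ s.1, PySem.Int.floordiv s.2 4))
    (([] : List Char), index)
  let st := r.1
  let a := PySem.Chars.replace st ['0'] ['A']
  let b := PySem.Chars.replace a ['1'] ['C']
  let c := PySem.Chars.replace b ['2'] ['G']
  let d := PySem.Chars.replace c ['3'] ['T']
  String.ofList d

-- ===== PORT B =====
-- ''.join('ACGT'[(index >> 2 * (k - 1 - i)) % 4] for i in range(k))
-- shift amount: 2*(k-1-i) >= 0 for every i in range(k), so '.toNat' is exact there
def rev_trans_alt (index : Int) (k : Int) : String :=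
  String.ofList ((PySem.List.pyRange 0 k 1).map (fun i =>
    PySem.List.pyGetD ['A','C','G','T']
      (PySem.Int.mod (index >>> (2 * (k - 1 - i)).toNat) 4) 'A'))

-- ===== PRECONDITION & SPEC =====
def Spec_rev_trans (index : Int) (k : Int) (out : String) : Prop := out = rev_trans_alt index k
instance (index : Int) (k : Int) (out : String) : Decidable (Spec_rev_trans index k out) := by unfold Spec_rev_trans; infer_instance

-- ===== CLAIM (what is proved, stated in full; the proofs are below) =====
def Claim_equal_rev_trans : Prop := ∀ (index : Int) (k : Int), Dom_rev_trans index k → Spec_rev_trans index k (rev_trans index k)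

-- ===== LEMMAS AND PROOFS =====

/-- digit of `idx` at base-4 place `e` (Python floor semantics). -/
def pvDigit (idx : Int) (e : Nat) : Int :=
  PySem.Int.mod (PySem.Int.floordiv idx ((4:Int) ^ e)) 4

/-- decimal character of a digit 0..3. -/
def pvDecCh (d : Int) : Char :=
  if d = 0 then '0' else if d = 1 then '1' else if d = 2 then '2' else '3'

/-- A's loop, as structural recursion on the trip count. -/
def pvStA : Nat → Int → List Char
  | 0, _ => []
  | n+1, idx => pvStA n (PySem.Int.floordiv idx 4) ++ PySem.Int.toChars (PySem.Int.mod idx 4)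

lemma pvDigit_bounds (idx : Int) (e : Nat) : 0 ≤ pvDigit idx e ∧ pvDigit idx e < 4 :=
  ⟨PySem.Int.mod_nonneg _ (by norm_num), PySem.Int.mod_lt _ (by norm_num)⟩

lemma pv_toChars_mod4 (idx : Int) :
    PySem.Int.toChars (PySem.Int.mod idx 4) = [pvDecCh (PySem.Int.mod idx 4)] := by
  have h0 : 0 ≤ PySem.Int.mod idx 4 := PySem.Int.mod_nonneg _ (by norm_num)
  have h4 : PySem.Int.mod idx 4 < 4 := PySem.Int.mod_lt _ (by norm_num)
  set m := PySem.Int.mod idx 4 with hm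
  interval_cases m <;> decide

lemma pvDigit_div4 (idx : Int) (e : Nat) :
    pvDigit (PySem.Int.floordiv idx 4) e = pvDigit idx (e+1) := by
  unfold pvDigit
  have h1 : PySem.Int.floordiv idx 4 = idx / 4 :=
    PySem.Int.floordiv_eq_ediv_of_pos (by norm_num)
  have h2 : PySem.Int.floordiv (idx / 4) ((4:Int) ^ e) = idx / 4 / 4 ^ e :=
    PySem.Int.floordiv_eq_ediv_of_pos (by positivity)
  have h3 : PySem.Int.floordiv idx ((4:Int) ^ (e+1)) = idx / 4 ^ (e+1) :=
    PySem.Int.floordiv_eq_ediv_of_pos (by positivity)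
  rw [h1, h2, h3, Int.ediv_ediv_of_nonneg (by norm_num), ← pow_succ']

lemma pvDigit_zero (idx : Int) : pvDigit idx 0 = PySem.Int.mod idx 4 := by
  unfold pvDigit
  have : PySem.Int.floordiv idx ((4:Int) ^ 0) = idx := by
    rw [pow_zero, PySem.Int.floordiv_eq_ediv_of_pos (by norm_num), Int.ediv_one]
  rw [this]

/-- the fold ignores the range element, so it is `pvStA` on the trip count. -/
lemma pv_foldl_eq_pvStA (l : List Int) (acc : List Char) (idx : Int) :
    (l.foldl
      (fun (s : List Char × Int) _ =>
        (PySem.Int.toChars (PySem.Int.mod s.2 4) ++ s.1, PySem.Int.floordiv s.2 4))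
      (acc, idx)).1 = pvStA l.length idx ++ acc := by
  induction l generalizing acc idx with
  | nil => simp [pvStA]
  | cons hd tl ih =>
      simp only [List.foldl_cons, List.length_cons, pvStA]
      rw [ih]
      simp [List.append_assoc]

lemma pvStA_eq_map (n : Nat) (idx : Int) :
    pvStA n idx = (List.range n).map (fun j => pvDecCh (pvDigit idx (n-1-j))) := by
  induction n generalizing idx with
  | zero => simp [pvStA]
  | succ n ih =>
      rw [pvStA, ih, List.range_succ, List.map_append, pv_toChars_mod4]
      congr 1
      · apply List.map_congr_left
        intro j hj
        have hj' : j < n := List.mem_range.mp hj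
        rw [pvDigit_div4]
        have h2 : n - 1 - j + 1 = n + 1 - 1 - j := by omega
        rw [h2]
      · simp [pvDigit_zero]

/-- single-character replace is a character map (fuel version of `Chars.replace.go`). -/
lemma pv_go_single (o nc : Char) (fuel : Nat) (l acc : List Char) (h : l.length ≤ fuel) :
    PySem.Chars.replace.go [o] [nc] fuel l acc
      = acc.reverse ++ l.map (fun c => if c = o then nc else c) := by
  induction fuel generalizing l acc with
  | zero =>
      have : l = [] := by cases l <;> simp_all
      subst this; simp [PySem.Chars.replace.go]
  | succ fuel ih =>
      cases l with
      | nil => simp [PySem.Chars.replace.go]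
      | cons c t =>
          rw [PySem.Chars.replace.go]
          by_cases hc : c = o
          · subst hc
            have hp : List.isPrefixOf [c] (c :: t) = true := by simp [List.isPrefixOf]
            simp only [hp, if_true]
            rw [ih _ _ (by simpa using Nat.le_of_succ_le_succ h)]
            simp
          · have hp : List.isPrefixOf [o] (c :: t) = false := by
              simp [List.isPrefixOf]
              exact fun h' => absurd h'.symm hc
            simp only [hp, Bool.false_eq_true, if_false]
            rw [ih _ _ (by simpa using Nat.le_of_succ_le_succ h)]
            simp [hc]

lemma pv_replace_single (o nc : Char) (s : List Char) :
    PySem.Chars.replace s [o] [nc] = s.map (fun c => if c = o then nc else c) := by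
  rw [PySem.Chars.replace]
  simp only [List.isEmpty_cons, Bool.false_eq_true, if_false]
  exact pv_go_single o nc s.length s [] le_rfl

/-- the DNA character B picks for a digit `d ∈ {0,1,2,3}`. -/
lemma pv_acgt_eq (d : Int) (h0 : 0 ≤ d) (h4 : d < 4) :
    PySem.List.pyGetD ['A','C','G','T'] d 'A'
      = (fun c => if c = '3' then 'T' else c)
        ((fun c => if c = '2' then 'G' else c)
        ((fun c => if c = '1' then 'C' else c)
        ((fun c => if c = '0' then 'A' else c) (pvDecCh d)))) := by
  interval_cases d <;> decide

lemma pv_shift_digit (idx : Int) (e : Nat) :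
    PySem.Int.mod (idx >>> (2 * e)) 4 = pvDigit idx e := by
  unfold pvDigit
  rw [Int.shiftRight_eq_div_pow, PySem.Int.floordiv_eq_ediv_of_pos (by positivity)]
  congr 1
  push_cast
  rw [pow_mul]
  norm_num

theorem pv_main (index k : Int) : rev_trans index k = rev_trans_alt index k := by
  unfold rev_trans rev_trans_alt
  simp only [pv_replace_single]
  rw [pv_foldl_eq_pvStA, List.append_nil, pvStA_eq_map]
  rw [PySem.List.pyRange_one, List.map_map, List.map_map, List.map_map, List.map_map,
    List.map_map, List.length_map, List.length_range]
  congr 1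
  apply List.map_congr_left
  intro j hj
  have hj' : j < (k - 0).toNat := List.mem_range.mp hj
  have hsh : (2 * (k - 1 - (0 + (j:Int)))).toNat = 2 * ((k - 0).toNat - 1 - j) := by omega
  simp only [Function.comp_apply]
  rw [hsh, pv_shift_digit]
  have hd := pvDigit_bounds index ((k - 0).toNat - 1 - j)
  exact (pv_acgt_eq (pvDigit index ((k - 0).toNat - 1 - j)) hd.1 hd.2).symm

-- ===== VERDICT (by name: the statement is the Claim_ definition above) =====
theorem rev_trans_spec : Claim_equal_rev_trans := by
  intro index k _
  unfold Spec_rev_trans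
  exact pv_main index k
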